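-- pv_equiv track=rewrite | github.com/batmantoday0-afk/parser | api/index.py | dedupe_preserve_first
-- ===== SOURCE A (Python) =====
-- from collections import Counter, OrderedDict
-- from typing import List, Tuple, Dict, Optional
--
-- def dedupe_preserve_first(names: List[str]) -> Tuple[List[str], Dict[str, int]]:
--     """
--     Deduplicate case-insensitively but preserve the original first-seen form.
--     Returns:
--       - unique_list: list of unique names (first-seen form)
--       - duplicates_map: { first-seen-form: duplicate_count_beyond_first }
--     Example: names = ["Pidgey", "pidgey", "Pidgey"] -> unique_list=["Pidgey"], duplicates_map={"Pidgey":2}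
--     """
--     seen: OrderedDict[str, str] = OrderedDict()  # key -> original form
--     counts: Counter = Counter()
--
--     for n in names:
--         key = n.casefold()
--         counts[key] += 1
--         if key not in seen:
--             seen[key] = n
--
--     unique_list = list(seen.values())
--     duplicates_map = {seen[k]: counts[k] - 1 for k in seen if counts[k] > 1}
--     return unique_list, duplicates_map
-- ===== SOURCE B (Python) =====
-- from collections import Counter
-- from typing import List, Tuple, Dict
--
--
-- def dedupe_preserve_first(names: List[str]) -> Tuple[List[str], Dict[str, int]]:
--     # Branch-free staged pipeline instead of one stateful loop:
--     #  - counts: Counter over the precomputed casefolded keys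
--     #  - first:  reversed-overwrite dict, so the LAST write (= first occurrence
--     #            in original order) wins: no membership test needed
--     #  - order:  dict.fromkeys gives the keys in first-occurrence order
--     keys = [n.casefold() for n in names]
--     counts = Counter(keys)
--     first = dict(zip(reversed(keys), reversed(names)))
--     order = list(dict.fromkeys(keys))
--     unique_list = [first[k] for k in order]
--     duplicates_map = {first[k]: counts[k] - 1 for k in order if counts[k] > 1}
--     return unique_list, duplicates_map
-- ===== Notes on version B (the rewrite author's own statement) =====
-- stated objective: alternative
-- what changed: B replaces A's single stateful loop (first-seen OrderedDict plus Counter with a membership branch) by a branch-free staged pipeline: Counter over precomputed casefolded keys, first-seen forms via a reversed-overwrite dict (last write wins = first occurrence), key order via dict.fromkeys, and both outputs derived by comprehensions over that order.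
import Mathlib
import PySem

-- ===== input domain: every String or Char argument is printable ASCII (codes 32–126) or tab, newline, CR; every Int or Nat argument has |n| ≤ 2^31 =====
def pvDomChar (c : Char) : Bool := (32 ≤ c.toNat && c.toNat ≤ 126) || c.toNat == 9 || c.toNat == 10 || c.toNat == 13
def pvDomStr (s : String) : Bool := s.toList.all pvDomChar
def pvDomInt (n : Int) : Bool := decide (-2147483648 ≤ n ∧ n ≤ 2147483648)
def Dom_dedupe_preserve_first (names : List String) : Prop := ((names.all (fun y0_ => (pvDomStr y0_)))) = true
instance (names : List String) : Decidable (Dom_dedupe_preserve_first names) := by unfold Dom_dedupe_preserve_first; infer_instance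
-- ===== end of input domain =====

-- B replaces A's single stateful loop (first-seen dict + Counter with a membership branch) by a
-- branch-free staged pipeline: Counter over precomputed keys, first forms via a reversed-overwrite
-- dict (last write wins = first occurrence), key order via dict.fromkeys (objective: alternative).
-- 'casefold' is ported as PySem.Str.lower, exact on the ASCII domain above.

-- ===== PORT A =====
def dedupe_preserve_first (names : List String) : List String × (List (String × Int)) :=
  let st := names.foldl
    (fun (st : PySem.Dict String String × PySem.Dict String Int) n =>
      let key := PySem.Str.lower n
      let counts := st.2.modify key 0 (· + 1)
      let seen := if st.1.contains key then st.1 else st.1.insert key n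
      (seen, counts))
    (PySem.Dict.empty, PySem.Dict.empty)
  let unique_list := st.1.values
  let duplicates_map := st.1.keys.foldl
    (fun (d : PySem.Dict String Int) k =>
      if st.2.getD k 0 > 1 then d.insert (st.1.getD k "") (st.2.getD k 0 - 1) else d)
    PySem.Dict.empty
  (unique_list, duplicates_map.items)

-- ===== PORT B =====
-- dict(zip(reversed(keys), reversed(names))) is a fold of plain inserts over the reversed zip;
-- Counter(keys) is PySem.Dict.counter; list(dict.fromkeys(keys)) is PySem.List.dedup.
-- first[k] is only evaluated at keys present in the dict, so it is ported as getD k "".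
def dedupe_preserve_first_alt (names : List String) : List String × (List (String × Int)) :=
  let keys := names.map PySem.Str.lower
  let counts := PySem.Dict.counter keys
  let first := (keys.reverse.zip names.reverse).foldl
    (fun (d : PySem.Dict String String) p => d.insert p.1 p.2) PySem.Dict.empty
  let order := PySem.List.dedup keys
  let unique_list := order.map (fun k => first.getD k "")
  let duplicates_map := order.foldl
    (fun (d : PySem.Dict String Int) k =>
      if counts.getD k 0 > 1 then d.insert (first.getD k "") (counts.getD k 0 - 1) else d)
    PySem.Dict.empty
  (unique_list, duplicates_map.items)

-- ===== PRECONDITION & SPEC =====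
def Spec_dedupe_preserve_first (names : List String) (out : List String × (List (String × Int))) : Prop := out = dedupe_preserve_first_alt names
instance (names : List String) (out : List String × (List (String × Int))) : Decidable (Spec_dedupe_preserve_first names out) := by unfold Spec_dedupe_preserve_first; infer_instance

-- ===== CLAIM (what is proved, stated in full; the proofs are below) =====
def Claim_equal_dedupe_preserve_first : Prop := ∀ (names : List String), Dom_dedupe_preserve_first names → Spec_dedupe_preserve_first names (dedupe_preserve_first names)

-- ===== LEMMAS AND PROOFS =====

-- spec list of first-seen forms, given the set s of already-seen keys
def pvFirsts (l : List String) (s : List String) : List String :=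
  match l with
  | [] => []
  | n :: t =>
    if PySem.Str.lower n ∈ s then pvFirsts t s
    else n :: pvFirsts t (PySem.Str.lower n :: s)

theorem pvFirsts_congr (l : List String) (s s' : List String)
    (h : ∀ k, k ∈ s ↔ k ∈ s') : pvFirsts l s = pvFirsts l s' := by
  induction l generalizing s s' with
  | nil => rfl
  | cons n t ih =>
    by_cases hm : PySem.Str.lower n ∈ s
    · rw [pvFirsts, pvFirsts, if_pos hm, if_pos ((h _).mp hm)]
      exact ih s s' h
    · rw [pvFirsts, pvFirsts, if_neg hm, if_neg (fun hc => hm ((h _).mpr hc))]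
      refine congrArg _ (ih _ _ ?_)
      intro k; simp only [List.mem_cons]
      exact or_congr Iff.rfl (h k)

-- A's pair fold is the pair of the two independent folds
theorem pvA_state (l : List String) (d : PySem.Dict String String) (c : PySem.Dict String Int) :
    l.foldl
      (fun (st : PySem.Dict String String × PySem.Dict String Int) n =>
        let key := PySem.Str.lower n
        let counts := st.2.modify key 0 (· + 1)
        let seen := if st.1.contains key then st.1 else st.1.insert key n
        (seen, counts)) (d, c)
    = (l.foldl (fun d n => if d.contains (PySem.Str.lower n) then d
                           else d.insert (PySem.Str.lower n) n) d,
       l.foldl (fun c n => c.modify (PySem.Str.lower n) 0 (· + 1)) c) := by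
  induction l generalizing d c with
  | nil => rfl
  | cons n t ih => exact ih _ _

-- A's seen dict: items are exactly the first-seen forms tagged with their keys
theorem pvSeen_items (l : List String) (d : PySem.Dict String String) :
    (l.foldl (fun d n => if d.contains (PySem.Str.lower n) then d
                         else d.insert (PySem.Str.lower n) n) d).items
    = d.items ++ (pvFirsts l d.keys).map (fun n => (PySem.Str.lower n, n)) := by
  induction l generalizing d with
  | nil => simp [pvFirsts]
  | cons n t ih =>
    by_cases hm : PySem.Str.lower n ∈ d.keys
    · have hc : d.contains (PySem.Str.lower n) = true := by
        rw [PySem.Dict.contains_eq_decide_mem_keys]; simpa using hm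
      rw [List.foldl_cons, hc, if_pos rfl, ih, pvFirsts, if_pos hm]
    · have hc : d.contains (PySem.Str.lower n) = false := by
        rw [PySem.Dict.contains_eq_decide_mem_keys]; simpa using hm
      rw [List.foldl_cons, hc]
      simp only [Bool.false_eq_true, if_false]
      rw [ih, PySem.Dict.items_insert_of_not_contains _ _ hc,
          PySem.Dict.keys_insert_of_not_contains _ _ hc, pvFirsts, if_neg hm]
      rw [pvFirsts_congr t (d.keys ++ [PySem.Str.lower n]) (PySem.Str.lower n :: d.keys)
            (by intro k; simp [or_comm])]
      simp

-- B's order (dict.fromkeys): the Set.add fold produces the keys of the first-seen forms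
theorem pvOrder_aux (l : List String) (s : List String) :
    (l.map PySem.Str.lower).foldl PySem.Set.add s
    = s ++ (pvFirsts l s).map PySem.Str.lower := by
  induction l generalizing s with
  | nil => simp [pvFirsts]
  | cons n t ih =>
    by_cases hm : PySem.Str.lower n ∈ s
    · rw [List.map_cons, List.foldl_cons, pvFirsts, if_pos hm]
      have : PySem.Set.add s (PySem.Str.lower n) = s := by
        simp [PySem.Set.add, hm]
      rw [this, ih]
    · rw [List.map_cons, List.foldl_cons, pvFirsts, if_neg hm]
      have : PySem.Set.add s (PySem.Str.lower n) = s ++ [PySem.Str.lower n] := by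
        simp [PySem.Set.add, hm]
      rw [this, ih]
      rw [pvFirsts_congr t (s ++ [PySem.Str.lower n]) (PySem.Str.lower n :: s)
            (by intro k; simp [or_comm])]
      simp

-- every first-seen form is the FIRST occurrence of its key, and its key is fresh w.r.t. s
theorem pvFind (l : List String) (s : List String) (n : String)
    (h : n ∈ pvFirsts l s) :
    PySem.Str.lower n ∉ s ∧
    l.find? (fun m => PySem.Str.lower m == PySem.Str.lower n) = some n := by
  induction l generalizing s with
  | nil => simp [pvFirsts] at h
  | cons x t ih =>
    by_cases hm : PySem.Str.lower x ∈ s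
    · rw [pvFirsts, if_pos hm] at h
      obtain ⟨hns, hfind⟩ := ih s h
      have hne : PySem.Str.lower x ≠ PySem.Str.lower n := fun he => hns (he ▸ hm)
      refine ⟨hns, ?_⟩
      rw [List.find?_cons_of_neg (by simpa using hne), hfind]
    · rw [pvFirsts, if_neg hm] at h
      rcases List.mem_cons.mp h with rfl | h
      · exact ⟨hm, by rw [List.find?_cons_of_pos (by simp)]⟩
      · obtain ⟨hns, hfind⟩ := ih _ h
        simp only [List.mem_cons, not_or] at hns
        refine ⟨hns.2, ?_⟩
        rw [List.find?_cons_of_neg (by simpa using fun he => hns.1 he.symm), hfind]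

theorem pvNodup (l : List String) (s : List String) :
    ((pvFirsts l s).map PySem.Str.lower).Nodup := by
  induction l generalizing s with
  | nil => simp [pvFirsts]
  | cons x t ih =>
    by_cases hm : PySem.Str.lower x ∈ s
    · rw [pvFirsts, if_pos hm]; exact ih s
    · rw [pvFirsts, if_neg hm, List.map_cons, List.nodup_cons]
      refine ⟨?_, ih _⟩
      intro hc
      obtain ⟨m, hm', he⟩ := List.mem_map.mp hc
      have := (pvFind t _ m hm').1
      simp only [List.mem_cons, not_or] at this
      exact this.1 he

-- the reversed-overwrite dict: lookup = first matching name in l (last insert wins)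
theorem pvFirstDict (l : List String) (d : PySem.Dict String String) (k : String) :
    ((l.map (fun n => (PySem.Str.lower n, n))).foldl
      (fun (d : PySem.Dict String String) p => d.insert p.1 p.2) d).get? k
    = (l.reverse.find? (fun m => PySem.Str.lower m == k)).or (d.get? k) := by
  induction l generalizing d with
  | nil => simp
  | cons n t ih =>
    rw [List.map_cons, List.foldl_cons, ih, List.reverse_cons, List.find?_append]
    cases hf : t.reverse.find? (fun m => PySem.Str.lower m == k) with
    | some m => simp
    | none =>
      by_cases he : k = PySem.Str.lower n
      · simp [he]
      · rw [List.find?_cons_of_neg (by simpa using fun h => he h.symm)]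
        simp [PySem.Dict.get?_insert, he]

-- the zipped reversed lists ARE the reversed tagged list
theorem pvZip_aux (l : List String) :
    (l.map PySem.Str.lower).zip l = l.map (fun n => (PySem.Str.lower n, n)) := by
  induction l with
  | nil => rfl
  | cons n t ih => simp [ih]

theorem pvZip (names : List String) :
    (names.map PySem.Str.lower).reverse.zip names.reverse
    = names.reverse.map (fun n => (PySem.Str.lower n, n)) := by
  rw [← List.map_reverse, pvZip_aux]

-- B's first dict looks up the first occurrence
theorem pvFirst_get (names : List String) (k : String) :
    (((names.map PySem.Str.lower).reverse.zip names.reverse).foldl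
      (fun (d : PySem.Dict String String) p => d.insert p.1 p.2) PySem.Dict.empty).get? k
    = names.find? (fun m => PySem.Str.lower m == k) := by
  rw [pvZip, show names.reverse.map (fun n => (PySem.Str.lower n, n))
        = (names.reverse).map (fun n => (PySem.Str.lower n, n)) from rfl,
      pvFirstDict, List.reverse_reverse]
  simp

-- ===== VERDICT (by name: the statement is the Claim_ definition above) =====
theorem dedupe_preserve_first_spec : Claim_equal_dedupe_preserve_first := by
  intro names _
  unfold Spec_dedupe_preserve_first dedupe_preserve_first dedupe_preserve_first_alt
  simp only [pvA_state]
  set F := pvFirsts names [] with hF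
  have hitems : (names.foldl (fun d n => if d.contains (PySem.Str.lower n) then d
                    else d.insert (PySem.Str.lower n) n) PySem.Dict.empty).items
      = F.map (fun n => (PySem.Str.lower n, n)) := by
    rw [pvSeen_items]
    simp [PySem.Dict.empty, hF]
  set seen := names.foldl (fun d n => if d.contains (PySem.Str.lower n) then d
                    else d.insert (PySem.Str.lower n) n) PySem.Dict.empty with hseen
  have hkeys : seen.keys = F.map PySem.Str.lower := by
    simp [PySem.Dict.keys, hitems, List.map_map, Function.comp_def]
  have hnd : seen.keys.Nodup := by rw [hkeys]; exact pvNodup names []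
  have horder : PySem.List.dedup (names.map PySem.Str.lower) = F.map PySem.Str.lower := by
    rw [PySem.List.dedup_eq_ofList, PySem.Set.ofList_eq_foldl, pvOrder_aux]
    simp [hF]
  have hcounts : PySem.Dict.counter (names.map PySem.Str.lower)
      = names.foldl (fun c n => c.modify (PySem.Str.lower n) 0 (· + 1)) PySem.Dict.empty := by
    rw [PySem.Dict.counter_eq_foldl, List.foldl_map]
  have hfst : ∀ n ∈ F,
      (((names.map PySem.Str.lower).reverse.zip names.reverse).foldl
        (fun (d : PySem.Dict String String) p => d.insert p.1 p.2)
        PySem.Dict.empty).getD (PySem.Str.lower n) "" = n := by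
    intro n hn
    rw [PySem.Dict.getD_eq_get?_getD, pvFirst_get, (pvFind names [] n hn).2]
    rfl
  have hsd : ∀ n ∈ F, seen.getD (PySem.Str.lower n) "" = n := by
    intro n hn
    exact PySem.Dict.getD_of_mem_items _ (by rw [hitems]; exact List.mem_map_of_mem hn) hnd ""
  refine Prod.ext ?_ ?_
  · -- unique lists
    show seen.values = (PySem.List.dedup (names.map PySem.Str.lower)).map _
    rw [horder, List.map_map]
    have : seen.values = F.map (fun n => n) := by
      simp [PySem.Dict.values, hitems, List.map_map, Function.comp_def]
    rw [this]
    exact (List.map_congr_left (fun n hn => (hfst n hn).symm))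
  · -- duplicates maps
    show (seen.keys.foldl _ PySem.Dict.empty).items
        = ((PySem.List.dedup (names.map PySem.Str.lower)).foldl _ PySem.Dict.empty).items
    rw [hkeys, horder, hcounts]
    congr 1
    rw [List.foldl_map, List.foldl_map]
    apply PySem.List.foldl_congr_mem
    intro acc n hn
    rw [hsd n hn, hfst n hn]
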